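-- pv_equiv track=rewrite | github.com/mpieciak18/early-projects | codewars_solutions/6kyu/data_reverse.py | data_reverse
-- ===== SOURCE A (Python) =====
-- def data_reverse(data):
--
--     data_dict = {}
--     for i in range(0, len(data)):
--         if(i+1) % 8 == 0:
--             data_dict[(i+1)/8] = data[i-7:i+1]
--         else:
--             continue
--
--     rev_data = []
--     for key in sorted(data_dict.keys(), reverse = True):
--         rev_data.extend(data_dict[key])
--
--     return rev_data
-- ===== SOURCE B (Python) =====
-- def data_reverse(data):
--     out = []
--     for i in range(len(data) - len(data) % 8 - 8, -1, -8):
--         out += data[i:i+8]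
--     return out
-- ===== Notes on version B (the rewrite author's own statement) =====
-- stated objective: faster
-- what changed: B drops A's dict-of-chunks plus reversed key sort and instead makes a single stride-8 pass over the full chunks, prepending each 8-element slice to the output.
import Mathlib
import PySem

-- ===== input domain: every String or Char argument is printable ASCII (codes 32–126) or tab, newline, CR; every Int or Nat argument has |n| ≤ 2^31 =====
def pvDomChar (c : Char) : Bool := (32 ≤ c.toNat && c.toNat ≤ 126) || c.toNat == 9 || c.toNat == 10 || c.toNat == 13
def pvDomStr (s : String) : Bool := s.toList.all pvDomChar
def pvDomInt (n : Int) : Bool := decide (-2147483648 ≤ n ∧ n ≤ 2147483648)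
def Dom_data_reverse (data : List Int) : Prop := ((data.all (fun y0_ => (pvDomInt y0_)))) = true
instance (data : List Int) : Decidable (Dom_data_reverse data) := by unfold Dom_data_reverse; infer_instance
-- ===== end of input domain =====

-- B replaces A's dict + key sort with a single stride-8 pass that prepends each
-- full 8-chunk, dropping the O(n log n) sort (objective: faster, one pass).

-- ===== PORT A =====
-- Python's dict key `(i+1)/8` is a float, but at every insertion 8 ∣ i+1, so it is an
-- exact integer; it is ported as PySem.Int.floordiv (i+1) 8, which is exact there.
def data_reverse (data : List Int) : List Int :=
  let data_dict : PySem.Dict Int (List Int) :=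
    (PySem.List.pyRange 0 (data.length : Int) 1).foldl
      (fun d i =>
        if PySem.Int.mod (i + 1) 8 == 0 then
          d.insert (PySem.Int.floordiv (i + 1) 8)
            (PySem.List.slice data (some (i - 7)) (some (i + 1)))
        else d)
      ⟨[]⟩
  (PySem.List.sorted data_dict.keys id true).foldl
    (fun rev_data key => rev_data ++ data_dict.getD key []) []

-- ===== PORT B =====
def data_reverse_alt (data : List Int) : List Int :=
  let n : Int := (data.length : Int)
  (PySem.List.pyRange (n - PySem.Int.mod n 8 - 8) (-1) (-8)).foldl
    (fun out i => out ++ PySem.List.slice data (some i) (some (i + 8))) []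

-- ===== PRECONDITION & SPEC =====
def Spec_data_reverse (data : List Int) (out : List Int) : Prop := out = data_reverse_alt data
instance (data : List Int) (out : List Int) : Decidable (Spec_data_reverse data out) := by unfold Spec_data_reverse; infer_instance

-- ===== CLAIM (what is proved, stated in full; the proofs are below) =====
def Claim_equal_data_reverse : Prop := ∀ (data : List Int), Dom_data_reverse data → Spec_data_reverse data (data_reverse data)

-- ===== LEMMAS AND PROOFS =====

-- the j-th full 8-chunk of data
def pvChunk (data : List Int) (j : Nat) : List Int :=
  PySem.List.slice data (some ((8 * j : Nat) : Int)) (some (((8 * j : Nat) : Int) + 8))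

-- the chunks of data, in reverse order, concatenated
def pvRev (data : List Int) : Nat → List Int
  | 0 => []
  | k + 1 => pvChunk data k ++ pvRev data k

-- the association list A's first loop builds after scanning indices 0..m-1
def pvPairs (data : List Int) (k : Nat) : List (Int × List Int) :=
  (List.range k).map (fun (j : Nat) => ((j : Int) + 1, pvChunk data j))

theorem pvChunk_eq (data : List Int) (j : Nat) :
    pvChunk data j = PySem.List.slice data (some ((8 * j : Nat) : Int)) (some (((8 * j : Nat) : Int) + 8)) := by
  simp [pvChunk]

theorem pvPairs_keys_lt (data : List Int) (k : Nat) (p : Int × List Int)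
    (hp : p ∈ pvPairs data k) : p.1 ≤ (k : Int) := by
  simp only [pvPairs, List.mem_map, List.mem_range] at hp
  obtain ⟨j, hj, rfl⟩ := hp
  push_cast; omega

-- A's first loop builds exactly the chunk table
theorem pvDictA (data : List Int) (m : Nat) :
    (PySem.List.pyRange 0 (m : Int) 1).foldl
      (fun (d : PySem.Dict Int (List Int)) i =>
        if PySem.Int.mod (i + 1) 8 == 0 then
          d.insert (PySem.Int.floordiv (i + 1) 8)
            (PySem.List.slice data (some (i - 7)) (some (i + 1)))
        else d)
      ⟨[]⟩ = ⟨pvPairs data (m / 8)⟩ := by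
  induction m with
  | zero => simp [PySem.List.pyRange, pvPairs]
  | succ m ih =>
    have hm : ((m + 1 : Nat) : Int) = (m : Int) + 1 := by push_cast; ring
    rw [hm, PySem.List.pyRange_one_succ_right (by positivity), List.foldl_append, ih]
    simp only [List.foldl_cons, List.foldl_nil]
    have hmod := PySem.Int.mod_natCast (m + 1) 8
    have hdiv := PySem.Int.floordiv_natCast (m + 1) 8
    rw [show (m : Int) + 1 = ((m + 1 : Nat) : Int) by push_cast; ring]
    by_cases h : (m + 1) % 8 = 0
    · have hcond : (PySem.Int.mod ((m + 1 : Nat) : Int) ((8 : Nat) : Int) == 0) = true := by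
        rw [hmod, h]; simp
      rw [show ((8:Nat):Int) = (8:Int) from rfl] at hcond
      rw [if_pos hcond, show PySem.Int.floordiv ((m + 1 : Nat) : Int) 8
            = (((m + 1) / 8 : Nat) : Int) by exact_mod_cast hdiv]
      have hfresh : (⟨pvPairs data (m / 8)⟩ : PySem.Dict Int (List Int)).contains
          ((((m + 1) / 8 : Nat)) : Int) = false := by
        simp only [PySem.Dict.contains, List.any_eq_false]
        intro p hp
        have hle := pvPairs_keys_lt data (m / 8) p hp
        simp only [beq_iff_eq]
        intro he
        rw [he] at hle
        have : (m + 1) / 8 = m / 8 + 1 := by omega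
        rw [this] at hle
        push_cast at hle
        omega
      simp only [PySem.Dict.insert, hfresh, Bool.false_eq_true, if_false]
      have hk : (m + 1) / 8 = m / 8 + 1 := by omega
      rw [hk]
      have h1 : ((m / 8 + 1 : Nat) : Int) = ((m / 8 : Nat) : Int) + 1 := by push_cast; ring
      have h2 : (m : Int) - 7 = ((8 * (m / 8) : Nat) : Int) := by omega
      have h3 : ((m + 1 : Nat) : Int) = ((8 * (m / 8) : Nat) : Int) + 8 := by omega
      rw [h1, h2, h3, ← pvChunk_eq]
      simp [pvPairs, List.range_succ]
    · have hcond : (PySem.Int.mod ((m + 1 : Nat) : Int) ((8 : Nat) : Int) == 0) = false := by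
        rw [hmod]
        simp only [beq_eq_false_iff_ne, ne_eq, Nat.cast_eq_zero]
        exact h
      rw [show ((8:Nat):Int) = (8:Int) from rfl] at hcond
      rw [if_neg (by simp only [hcond]; exact Bool.false_ne_true), show (m + 1) / 8 = m / 8 by omega]

-- lookup in the chunk table
theorem pvFindPairs (data : List Int) (k j : Nat) (hj : j < k) :
    List.find? (fun p => p.1 == (j : Int) + 1) (pvPairs data k)
      = some ((j : Int) + 1, pvChunk data j) := by
  induction k with
  | zero => omega
  | succ k ih =>
    simp only [pvPairs, List.range_succ, List.map_append, List.map_cons, List.map_nil,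
      List.find?_append]
    rcases Nat.lt_or_ge j k with hjk | hjk
    · have := ih hjk
      simp only [pvPairs] at this
      rw [this]
      rfl
    · have hj' : j = k := by omega
      subst hj'
      have hnone : List.find? (fun p => p.1 == (j : Int) + 1)
          ((List.range j).map (fun (j' : Nat) => ((j' : Int) + 1, pvChunk data j'))) = none := by
        rw [List.find?_eq_none]
        intro p hp
        simp only [List.mem_map, List.mem_range] at hp
        obtain ⟨j', hj', rfl⟩ := hp
        simp only [beq_iff_eq]
        intro he
        have : (j' : Int) = (j : Int) := by omega
        omega
      rw [hnone]
      simp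

-- A's second loop over the descending keys concatenates the chunks back to front
theorem pvLoopA (data : List Int) (K : Nat) (k : Nat) (hk : k ≤ K) (acc : List Int) :
    (((List.range k).map (fun (j : Nat) => ((j : Int) + 1))).reverse).foldl
      (fun rev_data key =>
        rev_data ++ (PySem.Dict.getD ⟨pvPairs data K⟩ key []))
      acc = acc ++ pvRev data k := by
  induction k generalizing acc with
  | zero => simp [pvRev]
  | succ k ih =>
    rw [List.range_succ, List.map_append, List.reverse_append]
    simp only [List.map_cons, List.map_nil, List.reverse_cons, List.reverse_nil,
      List.nil_append, List.singleton_append, List.foldl_cons]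
    have hget : PySem.Dict.getD (⟨pvPairs data K⟩ : PySem.Dict Int (List Int))
        ((k : Int) + 1) [] = pvChunk data k := by
      simp only [PySem.Dict.getD, PySem.Dict.get?]
      rw [pvFindPairs data K k (by omega)]
      rfl
    rw [hget, ih (by omega)]
    simp [pvRev]

theorem pvSortedKeys (data : List Int) (k : Nat) :
    PySem.List.sorted (PySem.Dict.keys (⟨pvPairs data k⟩ : PySem.Dict Int (List Int))) id true
      = ((List.range k).map (fun (j : Nat) => ((j : Int) + 1))).reverse := by
  have hkeys : PySem.Dict.keys (⟨pvPairs data k⟩ : PySem.Dict Int (List Int))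
      = (List.range k).map (fun (j : Nat) => ((j : Int) + 1)) := by
    simp [PySem.Dict.keys, pvPairs]
  apply PySem.List.sorted_rev_eq_of_perm_of_pairwise_gt
  · rw [hkeys]; exact List.reverse_perm _
  · rw [List.pairwise_reverse]
    rw [List.pairwise_map]
    refine List.Pairwise.imp ?_ (List.pairwise_lt_range)
    intro a b hab
    simp only [id_eq]
    omega

theorem pvLoopB (data : List Int) (k : Nat) (acc : List Int) :
    ((List.range k).map (fun (j : Nat) => ((8 * (k - 1 - j) : Nat) : Int))).foldl
      (fun out i => out ++ PySem.List.slice data (some i) (some (i + 8))) acc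
      = acc ++ pvRev data k := by
  induction k generalizing acc with
  | zero => simp [pvRev]
  | succ k ih =>
    rw [List.range_succ_eq_map, List.map_cons, List.map_map, List.foldl_cons]
    have hhead : ((8 * (k + 1 - 1 - 0) : Nat) : Int) = ((8 * k : Nat) : Int) := by omega
    have htail : ((List.range k).map ((fun (j : Nat) => ((8 * (k + 1 - 1 - j) : Nat) : Int)) ∘
          (fun j => j + 1)))
        = (List.range k).map (fun (j : Nat) => ((8 * (k - 1 - j) : Nat) : Int)) := by
      apply List.map_congr_left
      intro j hj
      simp only [List.mem_range] at hj
      simp only [Function.comp_apply]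
      omega
    rw [hhead, htail, ih]
    simp only [pvRev, pvChunk_eq]
    rw [List.append_assoc]

theorem pvAltEq (data : List Int) :
    data_reverse_alt data = pvRev data (data.length / 8) := by
  show (PySem.List.pyRange ((data.length : Int) - PySem.Int.mod (data.length : Int) 8 - 8)
      (-1) (-8)).foldl
      (fun out i => out ++ PySem.List.slice data (some i) (some (i + 8))) [] = _
  have hmod := PySem.Int.mod_natCast data.length 8
  have h1 : (data.length : Int) - PySem.Int.mod (data.length : Int) 8 - 8
      = ((8 * (data.length / 8) : Nat) : Int) - 8 := by
    push_cast at hmod ⊢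
    omega
  rw [h1, PySem.List.pyRange_of_neg _ _ (by norm_num : (-8:Int) < 0)]
  have h2 : (if (-1:Int) < ((8 * (data.length / 8) : Nat) : Int) - 8
      then ((((8 * (data.length / 8) : Nat) : Int) - 8 - (-1) + -(-8) - 1) / -(-8)).toNat else 0)
      = data.length / 8 := by
    split_ifs with h
    · simp only [neg_neg] at h ⊢
      omega
    · omega
  rw [h2]
  have h3 : ((List.range (data.length / 8)).map
        (fun (j : Nat) => ((8 * (data.length / 8) : Nat) : Int) - 8 + -8 * (j : Int)))
      = (List.range (data.length / 8)).map
        (fun (j : Nat) => ((8 * (data.length / 8 - 1 - j) : Nat) : Int)) := by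
    apply List.map_congr_left
    intro j hj
    simp only [List.mem_range] at hj
    omega
  have h4 := pvLoopB data (data.length / 8) []
  rw [← h3] at h4
  simpa using h4

-- ===== VERDICT (by name: the statement is the Claim_ definition above) =====
theorem data_reverse_spec : Claim_equal_data_reverse := by
  intro data _
  show data_reverse data = data_reverse_alt data
  rw [data_reverse, pvDictA, pvSortedKeys, pvAltEq]
  simpa using pvLoopA data (data.length / 8) (data.length / 8) le_rfl []
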